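-- pv_equiv track=rewrite | github.com/Ren-Xuan/LeetCode | 1508-m-merge-rangeNum.py | rangeSum2
-- ===== SOURCE A (Python) =====
-- from typing import List
--
-- def rangeSum2(nums: List[int], n: int, left: int, right: int) -> int:
--     """暴力"""
--     tmp = [e for e in nums]
--     for i in range(len(nums)-1):
--         cur = nums[i]
--         for j in range(i+1,len(nums)):
--             cur+=nums[j]
--             tmp.append(cur)
--     tmp.sort()
--     ans = 0
--     for i in range(left-1,right):
--         ans+=tmp[i]
--     return ans%(10**9+7)
-- ===== SOURCE B (Python) =====
-- def rangeSum2(nums, n, left, right):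
--     MOD = 10 ** 9 + 7
--     if left - 1 >= right:
--         return 0
--     pre = [0]
--     for x in nums:
--         pre.append(pre[-1] + x)
--     sums = [pre[j] - pre[i] for i in range(len(nums)) for j in range(i + 1, len(nums) + 1)]
--
--     def smallest_sum(k):
--         # sum of the k smallest subarray sums, found by binary search on the value
--         if k <= 0:
--             return 0
--         lo, hi = min(sums), max(sums)
--         while lo < hi:
--             mid = (lo + hi) // 2
--             if sum(1 for v in sums if v <= mid) >= k:
--                 hi = mid
--             else:
--                 lo = mid + 1
--         below = [v for v in sums if v < lo]
--         return sum(below) + lo * (k - len(below))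
--
--     return (smallest_sum(right) - smallest_sum(left - 1)) % MOD
-- ===== Notes on version B (the rewrite author's own statement) =====
-- stated objective: alternative
-- what changed: Instead of materialising all subarray sums, sorting them and summing a slice, B builds prefix sums once and computes the sum of the k smallest subarray sums (for k = right and k = left-1) by binary search on the value with counting passes, never sorting anything.
-- outside the precondition, e.g. on rangeSum2([1, 2], 2, 0, 1): A returns 4, B returns 1; on rangeSum2([1, 2], 2, 0, 2): A returns 6, B returns 3
import Mathlib
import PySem

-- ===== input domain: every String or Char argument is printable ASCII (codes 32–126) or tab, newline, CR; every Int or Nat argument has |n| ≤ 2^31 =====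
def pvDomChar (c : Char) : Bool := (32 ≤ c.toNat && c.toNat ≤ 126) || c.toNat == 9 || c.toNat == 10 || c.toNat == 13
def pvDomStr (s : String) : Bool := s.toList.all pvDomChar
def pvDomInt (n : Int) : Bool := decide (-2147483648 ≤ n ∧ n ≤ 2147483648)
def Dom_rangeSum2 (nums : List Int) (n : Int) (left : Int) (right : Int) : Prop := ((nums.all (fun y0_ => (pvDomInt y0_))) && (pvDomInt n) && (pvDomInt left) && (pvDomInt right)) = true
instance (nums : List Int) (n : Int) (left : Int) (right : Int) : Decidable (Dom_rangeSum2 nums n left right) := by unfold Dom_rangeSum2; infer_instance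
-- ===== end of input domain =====

-- B replaces sort-then-slice by prefix sums + binary search on the value of the k-th smallest
-- subarray sum (an alternative algorithm of similar cost; no sorting).


-- ===== PORT A =====
def rangeSum2 (nums : List Int) (n : Int) (left : Int) (right : Int) : Int :=
  let tmp := nums.map (fun e => e)
  let tmp := (PySem.List.pyRange 0 ((nums.length : Int) - 1) 1).foldl (fun tmp i =>
      let cur := PySem.List.pyGetD nums i 0
      ((PySem.List.pyRange (i + 1) (nums.length : Int) 1).foldl
          (fun (s : Int × List Int) j =>
            let cur := s.1 + PySem.List.pyGetD nums j 0
            (cur, s.2 ++ [cur]))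
          (cur, tmp)).2) tmp
  let tmp := PySem.List.sorted tmp (fun x => x) false
  let ans := (PySem.List.pyRange (left - 1) right 1).foldl
      (fun ans i => ans + PySem.List.pyGetD tmp i 0) 0
  PySem.Int.mod ans (10 ^ 9 + 7)

-- ===== PORT B =====
-- midpoint bounds, needed by the binary search's termination proof
theorem bsearch_mid_bounds (lo hi : Int) (h : lo < hi) :
    lo ≤ PySem.Int.floordiv (lo + hi) 2 ∧ PySem.Int.floordiv (lo + hi) 2 < hi := by
  constructor
  · rw [PySem.Int.le_floordiv_iff_mul_le (by norm_num)]; omega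
  · rw [PySem.Int.floordiv_lt_iff_lt_mul (by norm_num)]; omega

-- the 'while lo < hi' loop of smallest_sum
def bsearchLoop (sums : List Int) (k : Int) (lo hi : Int) : Int :=
  if h : lo < hi then
    let mid := PySem.Int.floordiv (lo + hi) 2
    if k ≤ (sums.countP (fun v => decide (v ≤ mid)) : Int) then
      bsearchLoop sums k lo mid
    else
      bsearchLoop sums k (mid + 1) hi
  else lo
termination_by (hi - lo).toNat
decreasing_by
  · have := bsearch_mid_bounds lo hi h; omega
  · have := bsearch_mid_bounds lo hi h; omega

def smallestSum (sums : List Int) (k : Int) : Int :=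
  if k ≤ 0 then 0
  else
    match PySem.List.min? sums (fun v => v), PySem.List.max? sums (fun v => v) with
    | some lo0, some hi0 =>
        let x := bsearchLoop sums k lo0 hi0
        let below := sums.filter (fun v => decide (v < x))
        below.sum + x * (k - (below.length : Int))
    | _, _ => 0   -- Python's min/max raise here (empty list); unreachable under Pre_

def rangeSum2_alt (nums : List Int) (n : Int) (left : Int) (right : Int) : Int :=
  if left - 1 ≥ right then 0
  else
    let pre := nums.foldl (fun pre x => pre ++ [PySem.List.pyGetD pre (-1) 0 + x]) [0]
    let sums := (PySem.List.pyRange 0 (nums.length : Int) 1).flatMap (fun i =>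
        (PySem.List.pyRange (i + 1) ((nums.length : Int) + 1) 1).map
          (fun j => PySem.List.pyGetD pre j 0 - PySem.List.pyGetD pre i 0))
    PySem.Int.mod (smallestSum sums right - smallestSum sums (left - 1)) (10 ^ 9 + 7)

-- ===== PRECONDITION & SPEC =====
-- Pre_ excludes exactly (a) inputs where A raises IndexError (a nonempty summation range reaching
-- past the n(n+1)/2 subarray sums) and (b) inputs with left < 1 and a nonempty range, where A reads
-- elements through Python's negative-index wraparound, outside the problem's 1-based domain.
def Pre_rangeSum2 (nums : List Int) (n : Int) (left : Int) (right : Int) : Prop :=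
  right ≤ left - 1 ∨ (1 ≤ left ∧ right ≤ ((nums.length * (nums.length + 1) / 2 : Nat) : Int))
instance (nums : List Int) (n : Int) (left : Int) (right : Int) : Decidable (Pre_rangeSum2 nums n left right) := by unfold Pre_rangeSum2; infer_instance

def pvWitness_rangeSum2 : List Int × Int × Int × Int := ([1, 2, 3], 3, 2, 4)

def Spec_rangeSum2 (nums : List Int) (n : Int) (left : Int) (right : Int) (out : Int) : Prop := out = rangeSum2_alt nums n left right
instance (nums : List Int) (n : Int) (left : Int) (right : Int) (out : Int) : Decidable (Spec_rangeSum2 nums n left right out) := by unfold Spec_rangeSum2; infer_instance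

-- ===== CLAIM (what is proved, stated in full; the proofs are below) =====
def Claim_equal_rangeSum2 : Prop := ∀ (nums : List Int) (n : Int) (left : Int) (right : Int), Dom_rangeSum2 nums n left right → Pre_rangeSum2 nums n left right → Spec_rangeSum2 nums n left right (rangeSum2 nums n left right)

-- ===== LEMMAS AND PROOFS =====

-- ---- generic facts about sorted lists and counting ----

theorem filter_eq_takeWhile_of_sorted (p : Int → Bool)
    (hp : ∀ a b : Int, a ≤ b → p b = true → p a = true) :
    ∀ (S : List Int), S.Pairwise (· ≤ ·) → S.filter p = S.takeWhile p := by
  intro S hS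
  induction S with
  | nil => rfl
  | cons h t ih =>
    rcases List.pairwise_cons.mp hS with ⟨hh, ht⟩
    by_cases hph : p h = true
    · simp [List.takeWhile_cons, hph, ih ht]
    · simp only [List.filter_cons, List.takeWhile_cons, hph, Bool.false_eq_true, if_false]
      rw [List.filter_eq_nil_iff.mpr]
      intro a ha hpa
      exact hph (hp h a (hh a ha) hpa)

theorem sorted_getElem_mono (S : List Int) (hS : S.Pairwise (· ≤ ·)) (i j : Nat)
    (hij : i ≤ j) (hj : j < S.length) : S[i]'(by omega) ≤ S[j] := by
  rcases Nat.lt_or_ge i j with h | h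
  · exact (List.pairwise_iff_getElem.mp hS) i j (by omega) hj h
  · have : i = j := by omega
    subst this; rfl

theorem lt_countP_iff_of_sorted (p : Int → Bool)
    (hp : ∀ a b : Int, a ≤ b → p b = true → p a = true)
    (S : List Int) (hS : S.Pairwise (· ≤ ·)) (i : Nat) (hi : i < S.length) :
    i < S.countP p ↔ p S[i] = true := by
  have hft := filter_eq_takeWhile_of_sorted p hp S hS
  have hc : S.countP p = (S.takeWhile p).length := by
    rw [List.countP_eq_length_filter, hft]
  have hsplit : S = S.takeWhile p ++ S.dropWhile p :=
    (List.takeWhile_append_dropWhile ..).symm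
  constructor
  · intro h
    rw [hc] at h
    have : S[i] = (S.takeWhile p ++ S.dropWhile p)[i]'(by rw [← hsplit]; exact hi) :=
      List.getElem_of_eq hsplit hi
    rw [this, List.getElem_append_left h]
    exact List.mem_takeWhile_imp (List.getElem_mem _)
  · intro h
    by_contra hcon
    rw [Nat.not_lt, hc] at hcon
    set c := (S.takeWhile p).length with hcdef
    have hclen : c < S.length := by omega
    have hdw : S.dropWhile p ≠ [] := by
      intro hnil
      have := congrArg List.length hsplit
      simp [hnil] at this
      omega
    have hSc : S[c]'hclen = (S.dropWhile p).head hdw := by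
      have : S[c]'hclen = (S.takeWhile p ++ S.dropWhile p)[c]'(by rw [← hsplit]; exact hclen) :=
        List.getElem_of_eq hsplit hclen
      rw [this, List.getElem_append_right (by omega)]
      simp [hcdef, List.getElem_zero_eq_head]
    have hfalse : p (S[c]'hclen) = false := by
      rw [hSc]; exact List.head_dropWhile_not p hdw
    have hle : S[c]'hclen ≤ S[i] := sorted_getElem_mono S hS c i hcon hi
    rw [hp _ _ hle h] at hfalse
    simp at hfalse

theorem take_sum_formula (S : List Int) (hS : S.Pairwise (· ≤ ·)) (k : Nat)
    (hk1 : 1 ≤ k) (hk : k ≤ S.length) :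
    (S.take k).sum = (S.filter (fun v => decide (v < S[k-1]'(by omega)))).sum
      + (S[k-1]'(by omega)) * ((k : Int) - (S.countP (fun v => decide (v < S[k-1]'(by omega))) : Int)) := by
  have hkm : k - 1 < S.length := by omega
  set x := S[k-1]'hkm with hxdef
  set p : Int → Bool := fun v => decide (v < x) with hpdef
  have hdc : ∀ a b : Int, a ≤ b → p b = true → p a = true := by
    intro a b hab hb
    simp only [hpdef, decide_eq_true_eq] at hb ⊢
    omega
  set c := S.countP p with hcdef
  have hck : c < k := by
    have h := lt_countP_iff_of_sorted p hdc S hS (k-1) hkm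
    have hpx : p (S[k-1]'hkm) = false := by
      simp only [hpdef, decide_eq_false_iff_not]; rw [← hxdef]; omega
    have : ¬ (k - 1 < c) := by
      intro hlt
      rw [h.mp hlt] at hpx
      exact Bool.noConfusion hpx
    omega
  have htw : S.takeWhile p = S.take c := by
    have hpre : S.takeWhile p <+: S := List.takeWhile_prefix p
    have hlen : (S.takeWhile p).length = c := by
      rw [hcdef, List.countP_eq_length_filter, filter_eq_takeWhile_of_sorted p hdc S hS]
    rw [← hlen]
    exact List.prefix_iff_eq_take.mp hpre
  have hsplit : S.take k = S.take c ++ (S.drop c).take (k - c) := by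
    rw [← List.take_add]
    congr 1
    omega
  have hmid : ∀ v ∈ (S.drop c).take (k - c), v = x := by
    intro v hv
    rw [List.mem_iff_getElem] at hv
    obtain ⟨t, ht, rfl⟩ := hv
    have htlen : t < k - c := by
      have := ht
      simp only [List.length_take, List.length_drop] at this
      omega
    have hct : c + t < S.length := by omega
    have hval : ((S.drop c).take (k-c))[t]'ht = S[c+t]'hct := by
      rw [List.getElem_take, List.getElem_drop]
    rw [hval]
    have hle : S[c+t]'hct ≤ x := by
      rw [hxdef]
      exact sorted_getElem_mono S hS (c+t) (k-1) (by omega) hkm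
    have hnlt : ¬ (S[c+t]'hct < x) := by
      intro hlt
      have h := (lt_countP_iff_of_sorted p hdc S hS (c+t) hct).mpr (by simp [hpdef, hlt])
      omega
    omega
  have hmidsum : ((S.drop c).take (k - c)).sum = ((k : Int) - c) * x := by
    have hlen : ((S.drop c).take (k - c)).length = k - c := by
      simp only [List.length_take, List.length_drop]
      omega
    have hrep := List.eq_replicate_of_mem hmid
    rw [hlen] at hrep
    rw [hrep, List.sum_replicate, nsmul_eq_mul, Nat.cast_sub (by omega : c ≤ k)]
  have hfil : (S.filter p).sum = (S.take c).sum := by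
    rw [filter_eq_takeWhile_of_sorted p hdc S hS, htw]
  calc (S.take k).sum = (S.take c).sum + ((S.drop c).take (k - c)).sum := by
        rw [hsplit, List.sum_append]
    _ = (S.filter p).sum + x * ((k : Int) - c) := by rw [hfil, hmidsum]; ring

-- ---- correctness of the binary search ----

theorem cntLE_mono (L : List Int) {y z : Int} (h : y ≤ z) :
    L.countP (fun v => decide (v ≤ y)) ≤ L.countP (fun v => decide (v ≤ z)) :=
  List.countP_mono_left (by intro a _ ha; simp only [decide_eq_true_eq] at *; omega)

theorem bsearchLoop_spec (L : List Int) (k : Int) (lo hi : Int) (hle : lo ≤ hi)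
    (hhi : k ≤ (L.countP (fun v => decide (v ≤ hi)) : Int))
    (hlo : ∀ y : Int, y < lo → (L.countP (fun v => decide (v ≤ y)) : Int) < k) :
    lo ≤ bsearchLoop L k lo hi ∧ bsearchLoop L k lo hi ≤ hi ∧
      k ≤ (L.countP (fun v => decide (v ≤ bsearchLoop L k lo hi)) : Int) ∧
      (∀ y : Int, y < bsearchLoop L k lo hi → (L.countP (fun v => decide (v ≤ y)) : Int) < k) := by
  have H : ∀ (m : Nat) (lo hi : Int), (hi - lo).toNat ≤ m → lo ≤ hi →
      k ≤ (L.countP (fun v => decide (v ≤ hi)) : Int) →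
      (∀ y : Int, y < lo → (L.countP (fun v => decide (v ≤ y)) : Int) < k) →
      lo ≤ bsearchLoop L k lo hi ∧ bsearchLoop L k lo hi ≤ hi ∧
        k ≤ (L.countP (fun v => decide (v ≤ bsearchLoop L k lo hi)) : Int) ∧
        (∀ y : Int, y < bsearchLoop L k lo hi → (L.countP (fun v => decide (v ≤ y)) : Int) < k) := by
    intro m
    induction m with
    | zero =>
      intro lo hi hm hle hhi hlo
      have heq : ¬ (lo < hi) := by omega
      rw [bsearchLoop, dif_neg heq]
      have : lo = hi := by omega
      subst this
      exact ⟨le_refl _, le_refl _, hhi, hlo⟩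
    | succ m ih =>
      intro lo hi hm hle hhi hlo
      by_cases hlt : lo < hi
      · rw [bsearchLoop, dif_pos hlt]
        have hmid := bsearch_mid_bounds lo hi hlt
        set mid := PySem.Int.floordiv (lo + hi) 2 with hmiddef
        by_cases hcond : k ≤ (L.countP (fun v => decide (v ≤ mid)) : Int)
        · simp only [hcond, if_pos]
          have h := ih lo mid (by omega) (by omega) hcond hlo
          exact ⟨h.1, by omega, h.2.2.1, h.2.2.2⟩
        · simp only [hcond, if_false]
          have hlo' : ∀ y : Int, y < mid + 1 → (L.countP (fun v => decide (v ≤ y)) : Int) < k := by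
            intro y hy
            rcases lt_or_ge y lo with h1 | h1
            · exact hlo y h1
            · have := cntLE_mono L (by omega : y ≤ mid)
              omega
          have h := ih (mid + 1) hi (by omega) (by omega) hhi hlo'
          exact ⟨by omega, h.2.1, h.2.2.1, h.2.2.2⟩
      · rw [bsearchLoop, dif_neg hlt]
        have : lo = hi := by omega
        subst this
        exact ⟨le_refl _, le_refl _, hhi, hlo⟩
  exact H (hi - lo).toNat lo hi (le_refl _) hle hhi hlo

-- smallestSum computes the sum of the k smallest elements (= the sum of a sorted prefix)
theorem smallestSum_eq (L S : List Int) (hperm : L.Perm S) (hS : S.Pairwise (· ≤ ·))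
    (k : Int) (hk0 : 0 ≤ k) (hk : k ≤ (L.length : Int)) :
    smallestSum L k = (S.take k.toNat).sum := by
  by_cases hk1 : k ≤ 0
  · have : k = 0 := by omega
    subst this
    simp [smallestSum]
  · have hkpos : 1 ≤ k := by omega
    have hLne : L ≠ [] := by
      intro h; subst h; simp at hk; omega
    rcases hmin : PySem.List.min? L (fun v => v) with _ | lo0
    · exact absurd ((PySem.List.min?_eq_none_iff L _).mp hmin) hLne
    rcases hmax : PySem.List.max? L (fun v => v) with _ | hi0
    · exact absurd ((PySem.List.max?_eq_none_iff L _).mp hmax) hLne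
    have hlomem : lo0 ∈ L := PySem.List.min?_mem hmin
    have hlomin : ∀ y ∈ L, lo0 ≤ y := PySem.List.min?_isMin hmin
    have hhimax : ∀ y ∈ L, y ≤ hi0 := PySem.List.max?_isMax hmax
    have hlehi : lo0 ≤ hi0 := hhimax lo0 hlomem
    set kn := k.toNat with hkndef
    have hknk : (kn : Int) = k := Int.toNat_of_nonneg hk0
    have hkn1 : 1 ≤ kn := by omega
    have hknlen : kn ≤ S.length := by
      have := hperm.length_eq; omega
    have hkm : kn - 1 < S.length := by omega
    set x0 := S[kn-1]'hkm with hx0def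
    have hcnt : ∀ p : Int → Bool, L.countP p = S.countP p := fun p => hperm.countP_eq p
    have hx0ge : (kn : Int) ≤ (L.countP (fun v => decide (v ≤ x0)) : Int) := by
      have hdc : ∀ a b : Int, a ≤ b → decide (b ≤ x0) = true → decide (a ≤ x0) = true := by
        intro a b hab hb; simp only [decide_eq_true_eq] at *; omega
      have := (lt_countP_iff_of_sorted _ hdc S hS (kn-1) hkm).mpr
        (by simp only [decide_eq_true_eq]; exact hx0def.ge)
      rw [hcnt]
      exact_mod_cast by omega
    have hx0lt : ∀ y : Int, y < x0 → (L.countP (fun v => decide (v ≤ y)) : Int) < k := by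
      intro y hy
      have hdc : ∀ a b : Int, a ≤ b → decide (b ≤ y) = true → decide (a ≤ y) = true := by
        intro a b hab hb; simp only [decide_eq_true_eq] at *; omega
      have : ¬ (kn - 1 < S.countP (fun v => decide (v ≤ y))) := by
        intro hlt
        have := (lt_countP_iff_of_sorted _ hdc S hS (kn-1) hkm).mp hlt
        simp only [decide_eq_true_eq] at this
        omega
      rw [hcnt]
      exact_mod_cast by omega
    have hbshi : k ≤ (L.countP (fun v => decide (v ≤ hi0)) : Int) := by
      have : L.countP (fun v => decide (v ≤ hi0)) = L.length :=
        List.countP_eq_length.mpr (by intro a ha; simpa using hhimax a ha)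
      omega
    have hbslo : ∀ y : Int, y < lo0 → (L.countP (fun v => decide (v ≤ y)) : Int) < k := by
      intro y hy
      have : L.countP (fun v => decide (v ≤ y)) = 0 :=
        List.countP_eq_zero.mpr (by intro a ha; simp only [decide_eq_true_eq]; have := hlomin a ha; omega)
      omega
    obtain ⟨hb1, hb2, hb3, hb4⟩ := bsearchLoop_spec L k lo0 hi0 hlehi hbshi hbslo
    set x := bsearchLoop L k lo0 hi0 with hxdef
    have hxx0 : x = x0 := by
      rcases lt_trichotomy x x0 with h | h | h
      · have := hx0lt x h; omega
      · exact h
      · have := hb4 x0 h; omega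
    rw [smallestSum, if_neg hk1, hmin, hmax]
    simp only [← hxdef, hxx0]
    have hsum : (L.filter (fun v => decide (v < x0))).sum = (S.filter (fun v => decide (v < x0))).sum :=
      (hperm.filter _).sum_eq
    have hlen : (L.filter (fun v => decide (v < x0))).length = S.countP (fun v => decide (v < x0)) := by
      rw [(hperm.filter _).length_eq, List.countP_eq_length_filter]
    rw [hsum, hlen]
    have := take_sum_formula S hS kn hkn1 hknlen
    rw [← hx0def] at this
    rw [this, hknk]

-- ---- characterising the lists the two programs build ----

-- running sums: sums1 c l = [c+l0, c+l0+l1, ...]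
def sums1 (c : Int) : List Int → List Int
  | [] => []
  | v :: l => (c + v) :: sums1 (c + v) l

theorem sums1_eq_map (c : Int) (l : List Int) :
    sums1 c l = (List.range l.length).map (fun m => c + (l.take (m+1)).sum) := by
  induction l generalizing c with
  | nil => rfl
  | cons v t ih =>
    simp only [sums1, ih (c + v), List.length_cons, List.range_succ_eq_map, List.map_cons,
      List.map_map, List.take_succ_cons, List.sum_cons]
    congr 1
    · simp
    · apply List.map_congr_left
      intro m hm
      simp [add_assoc]

theorem sums1_length (c : Int) (l : List Int) : (sums1 c l).length = l.length := by
  induction l generalizing c with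
  | nil => rfl
  | cons v t ih => simp [sums1, ih]

theorem scanA (l : List Int) : ∀ (c : Int) (acc : List Int),
    l.foldl (fun (s : Int × List Int) v => (s.1 + v, s.2 ++ [s.1 + v])) (c, acc)
      = (c + l.sum, acc ++ sums1 c l) := by
  induction l with
  | nil => intro c acc; simp [sums1]
  | cons v t ih =>
    intro c acc
    simp only [List.foldl_cons, List.sum_cons, sums1]
    rw [ih (c + v) (acc ++ [c + v])]
    simp [add_assoc]

theorem scanPre (l : List Int) : ∀ (a : List Int) (s : Int),
    l.foldl (fun pre x => pre ++ [PySem.List.pyGetD pre (-1) 0 + x]) (a ++ [s])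
      = a ++ s :: sums1 s l := by
  induction l with
  | nil => intro a s; simp [sums1]
  | cons v t ih =>
    intro a s
    simp only [List.foldl_cons]
    have hget : PySem.List.pyGetD (a ++ [s]) (-1) 0 = s := by
      simp [PySem.List.pyGetD, PySem.List.pyGet?, PySem.List.pyIdx?]
    rw [hget, ih (a ++ [s]) (s + v)]
    simp [sums1]

theorem pre_getD (nums : List Int) (jn : Nat) (hj : jn ≤ nums.length) :
    PySem.List.pyGetD (0 :: sums1 0 nums) (jn : Int) 0 = (nums.take jn).sum := by
  rw [PySem.List.pyGetD_natCast]
  cases jn with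
  | zero => simp
  | succ m =>
    simp only [List.getD_cons_succ]
    rw [sums1_eq_map]
    have hm : m < nums.length := by omega
    rw [List.getD_eq_getElem _ _ (by simpa using hm)]
    simp

theorem drop_take_sum (l : List Int) (a b : Nat) :
    ((l.drop a).take b).sum = (l.take (a + b)).sum - (l.take a).sum := by
  rw [List.take_add, List.sum_append]
  ring

theorem nums_entry (nums : List Int) (inat : Nat) (h : inat < nums.length) :
    (nums.take (inat+1)).sum - (nums.take inat).sum = PySem.List.pyGetD nums (inat : Int) 0 := by
  rw [PySem.List.pyGetD_natCast, List.take_succ, List.sum_append, List.getD_eq_getElem _ _ h]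
  simp [List.getElem?_eq_getElem h]

theorem inner_eq (nums : List Int) (i : Int) (h0 : 0 ≤ i) (hn : i < (nums.length : Int)) :
    (PySem.List.pyRange (i+1) ((nums.length : Int)+1) 1).map
      (fun j => PySem.List.pyGetD (0 :: sums1 0 nums) j 0 - PySem.List.pyGetD (0 :: sums1 0 nums) i 0)
    = PySem.List.pyGetD nums i 0 :: sums1 (PySem.List.pyGetD nums i 0) (nums.drop (i+1).toNat) := by
  lift i to Nat using h0 with inat
  have hlen : inat < nums.length := by exact_mod_cast hn
  rw [PySem.List.pyRange_one_cons (by push_cast; omega), List.map_cons]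
  have hpre : ∀ (jn : Nat), jn ≤ nums.length →
      PySem.List.pyGetD (0 :: sums1 0 nums) (jn : Int) 0 = (nums.take jn).sum :=
    fun jn hj => pre_getD nums jn hj
  have hhead : PySem.List.pyGetD (0 :: sums1 0 nums) ((inat : Int)+1) 0
      - PySem.List.pyGetD (0 :: sums1 0 nums) (inat : Int) 0 = PySem.List.pyGetD nums (inat : Int) 0 := by
    have h1 : ((inat : Int)+1) = ((inat+1 : Nat) : Int) := by push_cast; ring
    rw [h1, hpre (inat+1) (by omega), hpre inat (by omega), nums_entry nums inat hlen]
  rw [hhead]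
  congr 1
  have hdrop : ((inat : Int) + 1).toNat = inat + 1 := by omega
  rw [hdrop]
  have hlen2 : (nums.drop (inat+1)).length = nums.length - (inat+1) := by simp
  conv_rhs => rw [sums1_eq_map, hlen2]
  have hr : ((inat : Int) + 1 + 1) = ((inat + 2 : Nat) : Int) := by push_cast; ring
  have hr2 : ((nums.length : Int) + 1) = ((nums.length + 1 : Nat) : Int) := by push_cast; ring
  rw [hr, hr2, PySem.List.pyRange_one]
  have hcnt : (((nums.length + 1 : Nat) : Int) - ((inat + 2 : Nat) : Int)).toNat = nums.length - (inat+1) := by omega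
  rw [hcnt, List.map_map]
  apply List.map_congr_left
  intro m hm
  have hmlt : m < nums.length - (inat + 1) := List.mem_range.mp hm
  simp only [Function.comp]
  have hj : ((inat + 2 : Nat) : Int) + (m : Int) = ((inat + 2 + m : Nat) : Int) := by push_cast; ring
  rw [hj, hpre (inat + 2 + m) (by omega), hpre inat (by omega)]
  rw [drop_take_sum, ← nums_entry nums inat hlen]
  have : inat + 1 + (m + 1) = inat + 2 + m := by omega
  rw [this]
  ring

theorem flatMap_cons_perm (l : List Int) (h : Int → Int) (g : Int → List Int) :
    (l.flatMap (fun x => h x :: g x)).Perm (l.map h ++ l.flatMap g) := by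
  induction l with
  | nil => simp
  | cons a t ih =>
    simp only [List.flatMap_cons, List.map_cons, List.cons_append]
    refine List.Perm.cons _ ((ih.append_left (g a)).trans ?_)
    exact List.perm_append_comm_assoc (g a) (t.map h) (t.flatMap g)

-- the multiset of B's subarray sums is the multiset A builds
theorem sums_perm (nums : List Int) :
    ((PySem.List.pyRange 0 (nums.length : Int) 1).flatMap (fun i =>
        (PySem.List.pyRange (i + 1) ((nums.length : Int) + 1) 1).map
          (fun j => PySem.List.pyGetD (0 :: sums1 0 nums) j 0
                  - PySem.List.pyGetD (0 :: sums1 0 nums) i 0))).Perm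
    (nums ++ (PySem.List.pyRange 0 ((nums.length : Int) - 1) 1).flatMap
        (fun i => sums1 (PySem.List.pyGetD nums i 0) (nums.drop (i+1).toNat))) := by
  have hcong : (PySem.List.pyRange 0 (nums.length : Int) 1).flatMap (fun i =>
        (PySem.List.pyRange (i + 1) ((nums.length : Int) + 1) 1).map
          (fun j => PySem.List.pyGetD (0 :: sums1 0 nums) j 0
                  - PySem.List.pyGetD (0 :: sums1 0 nums) i 0))
      = (PySem.List.pyRange 0 (nums.length : Int) 1).flatMap (fun i =>
          PySem.List.pyGetD nums i 0
            :: sums1 (PySem.List.pyGetD nums i 0) (nums.drop (i+1).toNat)) := by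
    apply List.flatMap_congr
    intro i hi
    have hmem := PySem.List.mem_pyRange_one.mp hi
    exact inner_eq nums i hmem.1 hmem.2
  rw [hcong]
  refine (flatMap_cons_perm _ _ _).trans ?_
  have hmap : (PySem.List.pyRange 0 (nums.length : Int) 1).map (fun i => PySem.List.pyGetD nums i 0) = nums := by
    have := PySem.List.map_pyGetD_pyRange_zero nums 0
    simpa [PySem.List.len_eq] using this
  rw [hmap]
  apply List.Perm.append_left
  by_cases hnil : nums = []
  · subst hnil; simp
  · have hpos : 1 ≤ nums.length := List.length_pos_of_ne_nil hnil
    have hsplit : PySem.List.pyRange 0 (nums.length : Int) 1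
        = PySem.List.pyRange 0 ((nums.length : Int) - 1) 1 ++ PySem.List.pyRange ((nums.length : Int) - 1) (nums.length : Int) 1 :=
      PySem.List.pyRange_one_append 0 ((nums.length : Int) - 1) (nums.length : Int) (by omega) (by omega)
    rw [hsplit, List.flatMap_append]
    have hlast : PySem.List.pyRange ((nums.length : Int) - 1) (nums.length : Int) 1
        = [(nums.length : Int) - 1] := by
      rw [PySem.List.pyRange_one_cons (by omega), PySem.List.pyRange_one_eq_nil (by omega)]
    rw [hlast]
    have hdropnil : nums.drop ((nums.length : Int) - 1 + 1).toNat = [] := by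
      have : ((nums.length : Int) - 1 + 1).toNat = nums.length := by omega
      rw [this, List.drop_length]
    have hnil' : sums1 (PySem.List.pyGetD nums ((nums.length : Int) - 1) 0) [] = [] := rfl
    simp only [List.flatMap_cons, List.flatMap_nil, hdropnil, hnil', List.append_nil]
    exact List.Perm.refl _

-- A's nested loops build exactly nums followed by the running sums of every longer subarray
theorem T_char (nums : List Int) :
    (PySem.List.pyRange 0 ((nums.length : Int) - 1) 1).foldl (fun tmp i =>
      let cur := PySem.List.pyGetD nums i 0
      ((PySem.List.pyRange (i + 1) (nums.length : Int) 1).foldl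
          (fun (s : Int × List Int) j =>
            let cur := s.1 + PySem.List.pyGetD nums j 0
            (cur, s.2 ++ [cur]))
          (cur, tmp)).2) nums
    = nums ++ (PySem.List.pyRange 0 ((nums.length : Int) - 1) 1).flatMap
        (fun i => sums1 (PySem.List.pyGetD nums i 0) (nums.drop (i+1).toNat)) := by
  rw [PySem.List.foldl_congr_mem _ _
    (fun tmp i => tmp ++ sums1 (PySem.List.pyGetD nums i 0) (nums.drop (i+1).toNat)) nums ?_]
  · exact PySem.List.foldl_append_eq_flatMap _ _ _
  · intro acc i hi
    have hm := PySem.List.mem_pyRange_one.mp hi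
    have h := PySem.List.foldl_pyRange_pyGetD' nums 0
      (fun (s : Int × List Int) v => (s.1 + v, s.2 ++ [s.1 + v]))
      (PySem.List.pyGetD nums i 0, acc) (a := i+1) (by omega)
    show ((PySem.List.pyRange (i + 1) (nums.length : Int) 1).foldl
        (fun (s : Int × List Int) j => (s.1 + PySem.List.pyGetD nums j 0, s.2 ++ [s.1 + PySem.List.pyGetD nums j 0]))
        (PySem.List.pyGetD nums i 0, acc)).2
      = acc ++ sums1 (PySem.List.pyGetD nums i 0) (nums.drop (i+1).toNat)
    rw [h, scanA]

-- ---- lengths ----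

theorem sum_map_add_one (l : List Nat) (g : Nat → Nat) :
    (l.map (fun x => g x + 1)).sum = (l.map g).sum + l.length := by
  induction l with
  | nil => simp
  | cons a t ih => simp [ih]; omega

theorem sum_range_sub (m : Nat) : 2 * (((List.range m).map (fun k => m - k)).sum) = m * (m + 1) := by
  induction m with
  | zero => simp
  | succ m ih =>
    rw [List.range_succ, List.map_append, List.sum_append]
    have hmap : (List.range m).map (fun k => m + 1 - k) = (List.range m).map (fun k => (m - k) + 1) := by
      apply List.map_congr_left; intro k hk; have := List.mem_range.mp hk; omega
    rw [hmap, sum_map_add_one]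
    simp only [List.map_cons, List.map_nil, List.sum_cons, List.sum_nil, List.length_range]
    have h2 : (m+1) * (m+1+1) = m * (m+1) + 2*(m+1) := by ring
    have ih2 : 2 * ((List.range m).map (HSub.hSub m)).sum = m * (m+1) := ih
    omega

theorem T_length (nums : List Int) :
    (nums ++ (PySem.List.pyRange 0 ((nums.length : Int) - 1) 1).flatMap
        (fun i => sums1 (PySem.List.pyGetD nums i 0) (nums.drop (i+1).toNat))).length * 2
      = nums.length * (nums.length + 1) := by
  rw [List.length_append, List.length_flatMap, PySem.List.pyRange_zero, List.map_map]
  have hmap : (List.range ((nums.length : Int) - 1).toNat).map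
        ((fun i => (sums1 (PySem.List.pyGetD nums i 0) (nums.drop (i+1).toNat)).length) ∘ (fun k : Nat => (k : Int)))
      = (List.range (nums.length - 1)).map (fun k => (nums.length - 1) - k) := by
    have ht : ((nums.length : Int) - 1).toNat = nums.length - 1 := by omega
    rw [ht]
    apply List.map_congr_left
    intro k hk
    have hklt : k < nums.length - 1 := List.mem_range.mp hk
    simp only [Function.comp]
    rw [sums1_length]
    have : ((k : Int) + 1).toNat = k + 1 := by omega
    rw [this, List.length_drop]
    omega
  rw [hmap]
  rcases nums with _ | ⟨a, t⟩
  · simp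
  · have := sum_range_sub ((a :: t).length - 1)
    have hL : (a :: t).length = t.length + 1 := by simp
    rw [hL] at this ⊢
    simp only [Nat.add_sub_cancel] at this ⊢
    have h2 : (t.length + 1) * (t.length + 1 + 1) = t.length * (t.length + 1) + 2 * (t.length + 1) := by ring
    omega

-- ---- summing a slice of the sorted list ----

theorem pyRange_map_getD_take (xs : List Int) (b : Nat) (hb : b ≤ xs.length) :
    (PySem.List.pyRange 0 (b : Int) 1).map (fun i => PySem.List.pyGetD xs i 0) = xs.take b := by
  rw [PySem.List.pyRange_zero_nat, List.map_map]
  apply List.ext_getElem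
  · simp; omega
  · intro i h1 h2
    simp only [List.getElem_map, List.getElem_range, Function.comp]
    rw [PySem.List.pyGetD_natCast, List.getD_eq_getElem _ _ (by simp at h1; omega), List.getElem_take]

theorem sum_seg (S : List Int) (a b : Int) (h0 : 0 ≤ a) (hab : a ≤ b) (hb : b ≤ (S.length : Int)) :
    ((PySem.List.pyRange a b 1).map (fun i => PySem.List.pyGetD S i 0)).sum
      = (S.take b.toNat).sum - (S.take a.toNat).sum := by
  have hsplit := PySem.List.pyRange_one_append 0 a b h0 hab
  have h1 : ((PySem.List.pyRange 0 a 1).map (fun i => PySem.List.pyGetD S i 0)).sum = (S.take a.toNat).sum := by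
    have h := pyRange_map_getD_take S a.toNat (by omega)
    rw [Int.toNat_of_nonneg h0] at h
    rw [h]
  have h2 : ((PySem.List.pyRange 0 b 1).map (fun i => PySem.List.pyGetD S i 0)).sum = (S.take b.toNat).sum := by
    have h := pyRange_map_getD_take S b.toNat (by omega)
    rw [Int.toNat_of_nonneg (by omega : (0:Int) ≤ b)] at h
    rw [h]
  rw [hsplit, List.map_append, List.sum_append, h1] at h2
  omega

-- ===== VERDICT (by name: the statement is the Claim_ definition above) =====
theorem rangeSum2_spec : Claim_equal_rangeSum2 := by
  unfold Claim_equal_rangeSum2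
  intro nums n left right hdom hpre
  unfold Spec_rangeSum2 rangeSum2 rangeSum2_alt
  simp only [List.map_id']
  by_cases hg : left - 1 ≥ right
  · rw [if_pos hg, PySem.List.pyRange_one_eq_nil (a := left - 1) (b := right) (by omega), List.foldl_nil]
    rw [PySem.Int.mod_eq_emod_of_pos (by norm_num)]
    simp
  · rw [if_neg hg]
    have hleft : 1 ≤ left := by
      rcases hpre with h | h
      · omega
      · exact h.1
    have hright : right ≤ ((nums.length * (nums.length + 1) / 2 : Nat) : Int) := by
      rcases hpre with h | h
      · omega
      · exact h.2
    have hpre0 : nums.foldl (fun pre x => pre ++ [PySem.List.pyGetD pre (-1) 0 + x]) [0]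
        = 0 :: sums1 0 nums := by
      simpa using scanPre nums [] 0
    rw [hpre0, T_char]
    set T := nums ++ (PySem.List.pyRange 0 ((nums.length : Int) - 1) 1).flatMap
        (fun i => sums1 (PySem.List.pyGetD nums i 0) (nums.drop (i+1).toNat)) with hTdef
    set L := (PySem.List.pyRange 0 (nums.length : Int) 1).flatMap (fun i =>
        (PySem.List.pyRange (i + 1) ((nums.length : Int) + 1) 1).map
          (fun j => PySem.List.pyGetD (0 :: sums1 0 nums) j 0
                  - PySem.List.pyGetD (0 :: sums1 0 nums) i 0)) with hLdef
    set S := PySem.List.sorted T (fun x => x) false with hSdef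
    have hLT : L.Perm T := sums_perm nums
    have hST : S.Perm T := PySem.List.sorted_perm T (fun x => x) false
    have hLS : L.Perm S := hLT.trans hST.symm
    have hpw : S.Pairwise (· ≤ ·) := PySem.List.sorted_pairwise T (fun x => x)
    have hT2 : T.length * 2 = nums.length * (nums.length + 1) := T_length nums
    have hrlen : right ≤ (L.length : Int) := by
      have hLlen : L.length = T.length := hLT.length_eq
      have hdiv : nums.length * (nums.length + 1) / 2 = T.length := by omega
      rw [hLlen]
      rw [hdiv] at hright
      exact hright
    have hSlen : (S.length : Int) = (L.length : Int) := by
      have := hLS.length_eq; omega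
    rw [PySem.List.foldl_add]
    rw [sum_seg S (left - 1) right (by omega) (by omega) (by omega)]
    rw [smallestSum_eq L S hLS hpw right (by omega) hrlen,
        smallestSum_eq L S hLS hpw (left - 1) (by omega) (by omega)]
    rw [zero_add]
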